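-- pv_equiv track=rewrite | github.com/Peter-Olson/dictionary_python | dictionary.py | _remove_words_not_containing_x_letter_word
-- ===== SOURCE A (Python) =====
-- def _remove_words_not_containing_x_letter_word(word_dct, word_list):
--     """
--     Removes words from a dictionary that do not contain a
--     single X letter word contiguously within them. For example,
--     if the word length 7 is chosen, if we examine the word
--     'SONLIEST', the seven letter word 'ONLIEST' can be found
--     within it (yes that is a word), so it would be kept. But
--     if we examine the word 'CHARACTER', no seven letter words
--     can be found within that nine letter word.
--     :param word_dct: The dictionary of words
--     :param word_list: The list of X-letter words, which are
--         presumably all of the words in the dictionary of a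
--         given length
--     :return: Dictionary The dictionary, now with words removed
--         that do not have one or more X-letter word found
--         continuously within them
--     """
--     dct_list = list(word_dct.keys())
--     list_index = 0
--     word_index = 0
--     while word_index < len(dct_list):
--         word = dct_list[word_index]
--         found_word = False
--         for x_letter_word in word_list:
--             if x_letter_word in word:
--                 found_word = True
--                 break
--         if not found_word:
--             word_dct.pop(word)
--             dct_list.pop(list_index)
--         else:
--             list_index += 1
--             word_index += 1
--     return word_dct
-- ===== SOURCE B (Python) =====
-- def _remove_words_not_containing_x_letter_word(word_dct, word_list):
--     """Keep only dict words that contain some word_list word as a contiguous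
--     substring; faster: O(1) set lookups on sliding windows, one window pass
--     per distinct word_list length, instead of scanning the whole word_list
--     for every dict word. Mutates word_dct in place like the original."""
--     words = set(word_list)
--     lengths = {len(w) for w in word_list}
--
--     def keep(word):
--         n = len(word)
--         for x_len in lengths:
--             if x_len <= n:
--                 for i in range(n - x_len + 1):
--                     if word[i:i + x_len] in words:
--                         return True
--         return False
--
--     for word in [w for w in word_dct if not keep(w)]:
--         word_dct.pop(word)
--     return word_dct
-- ===== Notes on version B (the rewrite author's own statement) =====
-- stated objective: faster
-- what changed: Instead of scanning the whole word_list for every dictionary word (and deleting via a cursor-driven while loop with list.pop), B builds a set of word_list words and the set of their distinct lengths once, keeps a dict word iff one of its sliding windows of such a length is in the set (O(1) lookups), and pops the rejected keys in one pass.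
import Mathlib
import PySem

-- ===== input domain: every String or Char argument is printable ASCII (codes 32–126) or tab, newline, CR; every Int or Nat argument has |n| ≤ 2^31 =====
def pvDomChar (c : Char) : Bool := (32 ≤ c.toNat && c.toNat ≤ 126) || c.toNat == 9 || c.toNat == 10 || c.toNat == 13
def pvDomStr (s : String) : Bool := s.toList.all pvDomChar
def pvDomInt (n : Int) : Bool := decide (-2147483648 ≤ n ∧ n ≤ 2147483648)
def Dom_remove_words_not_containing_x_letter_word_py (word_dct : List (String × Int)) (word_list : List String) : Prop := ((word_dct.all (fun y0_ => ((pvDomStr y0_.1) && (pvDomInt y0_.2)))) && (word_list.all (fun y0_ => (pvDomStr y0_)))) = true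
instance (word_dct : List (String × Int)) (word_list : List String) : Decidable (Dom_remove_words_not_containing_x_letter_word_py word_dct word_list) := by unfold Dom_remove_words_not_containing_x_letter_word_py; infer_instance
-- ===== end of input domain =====

-- B replaces A's per-dict-word scan of the whole word_list by set lookups on sliding
-- windows (one window pass per distinct word_list length); equivalence of the RETURN
-- value is proved (both Pythons also mutate word_dct in place, in the same way).


-- ===== PORT A =====
-- A's inner 'for x_letter_word in word_list: if x_letter_word in word: found_word = True; break'
def pvAFound (word_list : List String) (word : String) : Bool :=
  word_list.any (fun x_letter_word => PySem.Str.isIn x_letter_word word)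

-- A's while loop; state = (word_dct, dct_list, list_index, word_index); fuel only for
-- totality (each iteration consumes one key of dct_list at or after word_index, so
-- dct_list.length + 1 steps always suffice).  list_index/word_index stay ≥ 0, so Nat;
-- dct_list[word_index] is in range by the while guard, so plain indexing is exact;
-- the unreachable 'none' fallbacks are Python's KeyError/IndexError (never hit from
-- the initial state when keys are unique, i.e. when word_dct came from a real dict).
def pvALoop (word_list : List String) (d : PySem.Dict String Int) (dct_list : List String)
    (list_index word_index : Nat) : Nat → PySem.Dict String Int
  | 0 => d
  | fuel + 1 =>
    if h : word_index < dct_list.length then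
      let word := dct_list[word_index]
      if pvAFound word_list word then
        pvALoop word_list d dct_list (list_index + 1) (word_index + 1) fuel
      else
        let d' := match d.pop? word with
          | some (_, d2) => d2
          | none => d          -- Python: KeyError (unreachable from the initial state)
        let dct_list' := match PySem.List.pop? dct_list (list_index : Int) with
          | some (_, l2) => l2
          | none => dct_list   -- Python: IndexError (unreachable from the initial state)
        pvALoop word_list d' dct_list' list_index word_index fuel
    else d

def remove_words_not_containing_x_letter_word_py (word_dct : List (String × Int)) (word_list : List String) : List (String × Int) :=
  let d := PySem.Dict.mk word_dct
  let dct_list := d.keys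
  (pvALoop word_list d dct_list 0 0 (dct_list.length + 1)).items

-- ===== PORT B =====
-- B's 'keep': for each distinct word_list length x_len ≤ len(word), slide a window and
-- test membership in the set of word_list words.  The set of strings is carried as a
-- PySem.Set of their character lists (String.toList is injective, so membership is the
-- same); word[i:i+x_len] is PySem.List.slice on the characters.
def pvBKeep (words : PySem.Set (List Char)) (lengths : PySem.Set Nat) (word : List Char) : Bool :=
  let n := word.length
  lengths.any (fun x_len =>
    x_len ≤ n &&
      (PySem.List.pyRange 0 ((n - x_len + 1 : Nat) : Int)).any (fun i =>
        words.contains (PySem.List.slice word (some i) (some (i + (x_len : Nat))))))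

def remove_words_not_containing_x_letter_word_py_alt (word_dct : List (String × Int)) (word_list : List String) : List (String × Int) :=
  let words : PySem.Set (List Char) := PySem.Set.ofList (word_list.map String.toList)
  let lengths : PySem.Set Nat := PySem.Set.ofList (word_list.map (fun w => w.toList.length))
  let d := PySem.Dict.mk word_dct
  let to_remove := d.keys.filter (fun w => !pvBKeep words lengths w.toList)
  (to_remove.foldl (fun d w => d.erase w) d).items

-- ===== PRECONDITION & SPEC =====
-- Pre_ excludes association lists with duplicate keys: they do not represent any Python
-- dict (A's argument is a dict, which cannot hold a key twice), and A's pop-based loop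
-- would raise KeyError on a repeated key.
def Pre_remove_words_not_containing_x_letter_word_py (word_dct : List (String × Int)) (word_list : List String) : Prop :=
  (word_dct.map Prod.fst).Nodup
instance (word_dct : List (String × Int)) (word_list : List String) : Decidable (Pre_remove_words_not_containing_x_letter_word_py word_dct word_list) := by unfold Pre_remove_words_not_containing_x_letter_word_py; infer_instance

def pvWitness_remove_words_not_containing_x_letter_word_py : (List (String × Int)) × List String :=
  ([("sonliest", 1), ("character", 2)], ["onliest"])

def Spec_remove_words_not_containing_x_letter_word_py (word_dct : List (String × Int)) (word_list : List String) (out : List (String × Int)) : Prop := out = remove_words_not_containing_x_letter_word_py_alt word_dct word_list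
instance (word_dct : List (String × Int)) (word_list : List String) (out : List (String × Int)) : Decidable (Spec_remove_words_not_containing_x_letter_word_py word_dct word_list out) := by unfold Spec_remove_words_not_containing_x_letter_word_py; infer_instance

-- ===== CLAIM (what is proved, stated in full; the proofs are below) =====
def Claim_equal_remove_words_not_containing_x_letter_word_py : Prop := ∀ (word_dct : List (String × Int)) (word_list : List String), Dom_remove_words_not_containing_x_letter_word_py word_dct word_list → Pre_remove_words_not_containing_x_letter_word_py word_dct word_list → Spec_remove_words_not_containing_x_letter_word_py word_dct word_list (remove_words_not_containing_x_letter_word_py word_dct word_list)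

-- ===== LEMMAS AND PROOFS =====

-- keys of a filtered association list
theorem map_fst_filter_ne (l : List (String × Int)) (w : String) :
    (l.filter (fun p => !(p.1 == w))).map Prod.fst = (l.map Prod.fst).filter (fun x => !(x == w)) := by
  induction l with
  | nil => rfl
  | cons kv l ih => by_cases h : kv.1 = w <;> simp [h, ih]

-- dct_list.pop(list_index) at the cursor position
theorem pop_mid (a : List String) (w : String) (rest : List String) :
    PySem.List.pop? (a ++ w :: rest) (a.length : Int) = some (w, a ++ rest) := by
  simp [PySem.List.pop?, PySem.List.pyIdx?]
  rw [List.eraseIdx_append_of_length_le Nat.le.refl (w :: rest)]; simp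

-- A's while loop, started with both cursors at pre.length on a dict whose (unique) keys
-- are pre ++ rest, filters the items whose key lies in rest by pvAFound.
theorem pvALoop_filter (word_list : List String) (rest : List String) :
    ∀ (pre : List String) (l : List (String × Int)), l.map Prod.fst = pre ++ rest →
    (pre ++ rest).Nodup →
    pvALoop word_list (PySem.Dict.mk l) (pre ++ rest) pre.length pre.length (rest.length + 1) =
      PySem.Dict.mk (l.filter (fun kv => pvAFound word_list kv.1 || !rest.contains kv.1)) := by
  induction rest with
  | nil =>
    intro pre l hmap hnd
    rw [pvALoop]
    simp
  | cons w rest ih =>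
    intro pre l hmap hnd
    rw [pvALoop]
    have hlt : pre.length < (pre ++ w :: rest).length := by simp
    rw [dif_pos hlt]
    have hw : (pre ++ w :: rest)[pre.length]'hlt = w := List.getElem_of_append rfl rfl
    simp only [hw]
    have hwnotin : w ∉ pre ∧ w ∉ rest := by
      have := hnd
      simp [List.nodup_append] at this
      exact ⟨fun h => (this.2.2 w h).1 rfl, this.2.1.1⟩
    by_cases hp : pvAFound word_list w = true
    · rw [if_pos hp]
      have h1 : pre ++ w :: rest = (pre ++ [w]) ++ rest := by simp
      have h2 : pre.length + 1 = (pre ++ [w]).length := by simp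
      rw [h1, h2]
      rw [show (w :: rest).length = rest.length + 1 from rfl]
      rw [ih (pre ++ [w]) l (by rw [hmap, h1]) (by rw [← h1]; exact hnd)]
      congr 1
      apply List.filter_congr
      intro kv _
      by_cases hkw : kv.1 = w
      · simp [hkw, hp]
      · simp [hkw]
    · rw [if_neg hp]
      have hmem : w ∈ (PySem.Dict.mk l).keys := by
        show w ∈ l.map Prod.fst
        rw [hmap]; simp
      obtain ⟨v, hv⟩ : ∃ v, (PySem.Dict.mk l).get? w = some v := by
        rcases h : (PySem.Dict.mk l).get? w with _ | v
        · rw [PySem.Dict.get?_eq_none_iff_not_mem_keys] at h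
          exact absurd hmem h
        · exact ⟨v, rfl⟩
      have hpop : (PySem.Dict.mk l).pop? w = some (v, PySem.Dict.mk (l.filter (fun p => !(p.1 == w)))) := by
        simp [PySem.Dict.pop?, hv]; rfl
      have hmap' : (l.filter (fun p => !(p.1 == w))).map Prod.fst = pre ++ rest := by
        rw [map_fst_filter_ne, hmap, List.filter_append, List.filter_cons]
        have h1 : List.filter (fun x => !(x == w)) pre = pre :=
          List.filter_eq_self.mpr (fun x hx => by
            simp only [Bool.not_eq_eq_eq_not, Bool.not_true, beq_eq_false_iff_ne, ne_eq]
            intro he; exact hwnotin.1 (he ▸ hx))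
        have h2 : List.filter (fun x => !(x == w)) rest = rest :=
          List.filter_eq_self.mpr (fun x hx => by
            simp only [Bool.not_eq_eq_eq_not, Bool.not_true, beq_eq_false_iff_ne, ne_eq]
            intro he; exact hwnotin.2 (he ▸ hx))
        simp [h1, h2]
      have hnd' : (pre ++ rest).Nodup := by
        have := hnd; simp [List.nodup_append] at this ⊢
        exact ⟨this.1, this.2.1.2, fun x hx => (this.2.2 x hx).2⟩
      rw [hpop, pop_mid]
      show pvALoop word_list (PySem.Dict.mk (l.filter (fun p => !(p.1 == w)))) (pre ++ rest)
            pre.length pre.length (rest.length + 1) = _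
      rw [ih pre _ hmap' hnd']
      rw [List.filter_filter]
      congr 1
      apply List.filter_congr
      intro kv _
      by_cases hkw : kv.1 = w
      · simp [hkw, hp]
      · simp [hkw]

-- B's removal pass: folding dict erase over a list of keys filters the items.
theorem foldl_erase_filter (l : List (String × Int)) (ks : List String) :
    (ks.foldl (fun d w => d.erase w) (PySem.Dict.mk l)).items =
      l.filter (fun kv => !ks.contains kv.1) := by
  induction ks generalizing l with
  | nil => simp
  | cons k ks ih =>
    rw [List.foldl_cons]
    have h1 : (PySem.Dict.mk l).erase k = PySem.Dict.mk (l.filter (fun p => !(p.1 == k))) := rfl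
    rw [h1, ih, List.filter_filter]
    apply List.filter_congr
    intro kv _
    simp [Bool.and_comm, beq_eq_decide]

-- The two keep-tests agree: some word_list word occurs in `word` iff some window of a
-- word_list length equals a member of the word_list set.
theorem pvFound_eq_keep (word_list : List String) (word : String) :
    pvAFound word_list word =
      pvBKeep (PySem.Set.ofList (word_list.map String.toList))
        (PySem.Set.ofList (word_list.map (fun w => w.toList.length))) word.toList := by
  rw [Bool.eq_iff_iff]
  unfold pvAFound pvBKeep
  simp only [List.any_eq_true, Bool.and_eq_true, decide_eq_true_eq,
    PySem.Str.isIn_eq, PySem.Chars.isIn_iff_infix, PySem.Set.contains_iff,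
    PySem.Set.mem_ofList, List.mem_map, PySem.List.mem_pyRange_one]
  constructor
  · rintro ⟨x, hx, hinf⟩
    obtain ⟨s, t, hst⟩ := hinf
    refine ⟨x.toList.length, ⟨x, hx, rfl⟩, ?_, (s.length : Int), ⟨by positivity, ?_⟩, ?_⟩
    · have h := congrArg List.length hst
      rw [List.length_append, List.length_append] at h; omega
    · have hlen := congrArg List.length hst
      rw [List.length_append, List.length_append] at hlen
      have hle : x.toList.length ≤ word.toList.length := by omega
      have : s.length < word.toList.length - x.toList.length + 1 := by omega
      exact_mod_cast this
    · have hcast : (s.length : Int) + (x.toList.length : Nat) = ((s.length + x.toList.length : Nat) : Int) := by push_cast; ring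
      rw [hcast, PySem.List.slice_natCast]
      refine ⟨x, hx, ?_⟩
      have hW : word.toList = s ++ (x.toList ++ t) := by rw [← hst]; simp
      rw [hW, Nat.add_sub_cancel_left, List.drop_left, List.take_left]
  · rintro ⟨L, ⟨u, hu, hL⟩, hLn, i, ⟨hi0, hiub⟩, x, hx, hxs⟩
    refine ⟨x, hx, ?_⟩
    have hi : i = ((i.toNat : Nat) : Int) := by omega
    have hcast : ((i.toNat : Nat) : Int) + (L : Nat) = ((i.toNat + L : Nat) : Int) := by push_cast; ring
    rw [hi, hcast, PySem.List.slice_natCast] at hxs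
    rw [hxs, Nat.add_sub_cancel_left]
    exact ((word.toList.drop i.toNat).take_prefix L).isInfix.trans (word.toList.drop_suffix i.toNat).isInfix

-- A computes the pvAFound-filter of the items.
theorem portA_eq_filter (word_dct : List (String × Int)) (word_list : List String)
    (hpre : (word_dct.map Prod.fst).Nodup) :
    remove_words_not_containing_x_letter_word_py word_dct word_list =
      word_dct.filter (fun kv => pvAFound word_list kv.1) := by
  show (pvALoop word_list (PySem.Dict.mk word_dct) (([] : List String) ++ word_dct.map Prod.fst)
      ([] : List String).length ([] : List String).length ((word_dct.map Prod.fst).length + 1)).items = _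
  rw [pvALoop_filter word_list (word_dct.map Prod.fst) [] word_dct rfl (by simpa using hpre)]
  apply List.filter_congr
  intro kv hkv
  have hm : kv.1 ∈ word_dct.map Prod.fst := List.mem_map_of_mem hkv
  simp [hm]

-- B computes the pvBKeep-filter of the items.
theorem portB_eq_filter (word_dct : List (String × Int)) (word_list : List String) :
    remove_words_not_containing_x_letter_word_py_alt word_dct word_list =
      word_dct.filter (fun kv =>
        pvBKeep (PySem.Set.ofList (word_list.map String.toList))
          (PySem.Set.ofList (word_list.map (fun w => w.toList.length))) kv.1.toList) := by
  show (((word_dct.map Prod.fst).filter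
      (fun w => !pvBKeep (PySem.Set.ofList (word_list.map String.toList))
        (PySem.Set.ofList (word_list.map (fun w => w.toList.length))) w.toList)).foldl
      (fun d w => d.erase w) (PySem.Dict.mk word_dct)).items = _
  rw [foldl_erase_filter]
  apply List.filter_congr
  intro kv hkv
  have hm : kv.1 ∈ word_dct.map Prod.fst := List.mem_map_of_mem hkv
  simp [List.mem_filter, hm]

-- ===== VERDICT (by name: the statement is the Claim_ definition above) =====
theorem remove_words_not_containing_x_letter_word_py_spec : Claim_equal_remove_words_not_containing_x_letter_word_py := by
  intro word_dct word_list _ hpre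
  unfold Spec_remove_words_not_containing_x_letter_word_py
  rw [portA_eq_filter word_dct word_list hpre, portB_eq_filter]
  apply List.filter_congr
  intro kv _
  rw [pvFound_eq_keep]
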